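-- pv_equiv track=rewrite | github.com/adityaduggal/rigpl-erpnext | rigpl_erpnext/rigpl_erpnext/item.py | fn_next_string
-- ===== SOURCE A (Python) =====
-- def fn_next_string(doc,s):
-- 	#This function would increase the serial number by One following the
-- 	#alpha-numeric rules as well
-- 	if len(s) == 0:
-- 		return '1'
-- 	head = s[0:-1]
-- 	tail = s[-1]
-- 	if tail == 'Z':
-- 		return fn_next_string(doc, head) + '0'
-- 	if tail == '9':
-- 		return head+'A'
-- 	if tail == 'H':
-- 		return head+'J'
-- 	if tail == 'N':
-- 		return head+'P'
-- 	return head + chr(ord(tail)+1)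
-- ===== SOURCE B (Python) =====
-- def _inc(c):
--     return {'9': 'A', 'H': 'J', 'N': 'P'}.get(c) or chr(ord(c) + 1)
--
-- def fn_next_string(doc, s):
--     # iterative: count the trailing run of 'Z' (each becomes '0'),
--     # then bump the first non-'Z' from the right, or prepend '1'.
--     r = s[::-1]
--     k = 0
--     while k < len(r) and r[k] == 'Z':
--         k += 1
--     if k == len(r):
--         return '1' + '0' * k
--     return s[:len(s) - k - 1] + _inc(r[k]) + '0' * k
-- ===== Notes on version B (the rewrite author's own statement) =====
-- stated objective: simpler
-- what changed: Replaces the right-peeling recursion (one slice-and-copy per trailing 'Z') by a single iterative scan that counts the trailing 'Z' run k and builds prefix + bumped char + k zeros in one step.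
import Mathlib
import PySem

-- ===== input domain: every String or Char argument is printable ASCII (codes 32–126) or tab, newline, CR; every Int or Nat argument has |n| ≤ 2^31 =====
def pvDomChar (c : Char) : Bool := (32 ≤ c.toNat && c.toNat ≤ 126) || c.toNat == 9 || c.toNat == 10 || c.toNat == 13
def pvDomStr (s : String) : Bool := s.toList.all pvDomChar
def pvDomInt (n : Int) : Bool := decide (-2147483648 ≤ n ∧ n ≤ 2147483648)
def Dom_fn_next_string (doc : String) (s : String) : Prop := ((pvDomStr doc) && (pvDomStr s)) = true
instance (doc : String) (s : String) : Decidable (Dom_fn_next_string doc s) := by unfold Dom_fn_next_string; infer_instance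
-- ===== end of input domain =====

-- B replaces A's right-peeling recursion by a single iterative scan of the trailing 'Z' run (simpler decomposition).


-- ===== PORT A =====
-- A's recursion, on the char list: peel the last char (head = s[0:-1], tail = s[-1]).
def fnA (cs : List Char) : List Char :=
  if h : cs = [] then ['1']
  else
    let head := cs.dropLast
    let tail := cs.getLast h
    if tail = 'Z' then fnA head ++ ['0']
    else if tail = '9' then head ++ ['A']
    else if tail = 'H' then head ++ ['J']
    else if tail = 'N' then head ++ ['P']
    else head ++ [Char.ofNat (tail.toNat + 1)]
termination_by cs.length
decreasing_by
  have hp : 0 < cs.length := List.length_pos_iff.mpr h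
  simp only [List.length_dropLast]
  omega

def fn_next_string (doc : String) (s : String) : String := String.ofList (fnA s.toList)

-- ===== PORT B =====
def incChar (c : Char) : Char :=
  if c = '9' then 'A'
  else if c = 'H' then 'J'
  else if c = 'N' then 'P'
  else Char.ofNat (c.toNat + 1)

-- Source B: scan the reversed string for the trailing 'Z' run of length k, then one build step.
def fnB (cs : List Char) : List Char :=
  let r := cs.reverse
  let k := (r.takeWhile (fun c => c == 'Z')).length
  match r.dropWhile (fun c => c == 'Z') with
  | [] => '1' :: List.replicate k '0'
  | c :: pre => pre.reverse ++ incChar c :: List.replicate k '0'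

def fn_next_string_alt (doc : String) (s : String) : String := String.ofList (fnB s.toList)

-- ===== PRECONDITION & SPEC =====
def Spec_fn_next_string (doc : String) (s : String) (out : String) : Prop := out = fn_next_string_alt doc s
instance (doc : String) (s : String) (out : String) : Decidable (Spec_fn_next_string doc s out) := by unfold Spec_fn_next_string; infer_instance

-- ===== CLAIM (what is proved, stated in full; the proofs are below) =====
def Claim_equal_fn_next_string : Prop := ∀ (doc : String) (s : String), Dom_fn_next_string doc s → Spec_fn_next_string doc s (fn_next_string doc s)

-- ===== LEMMAS AND PROOFS =====

-- appending a 'Z' on the right adds one '0' to B's answer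
theorem fnB_snoc_Z (head : List Char) : fnB (head ++ ['Z']) = fnB head ++ ['0'] := by
  unfold fnB
  simp only [List.reverse_append, List.reverse_cons, List.reverse_nil, List.nil_append,
    List.cons_append, List.takeWhile_cons, List.dropWhile_cons]
  norm_num
  cases h : head.reverse.dropWhile (fun c => c == 'Z') with
  | nil => simp [List.replicate_succ']
  | cons c pre => simp [List.replicate_succ', List.append_assoc]

-- appending a non-'Z' on the right: B returns head ++ [incChar c]
theorem fnB_snoc_ne (head : List Char) (c : Char) (hc : ¬ c = 'Z') :
    fnB (head ++ [c]) = head ++ [incChar c] := by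
  have hb : (c == 'Z') = false := by simpa using hc
  unfold fnB
  simp [hb]

-- one unfolding step of A's recursion, phrased on a snoc
theorem fnA_snoc (head : List Char) (c : Char) :
    fnA (head ++ [c]) = if c = 'Z' then fnA head ++ ['0'] else head ++ [incChar c] := by
  have hne : head ++ [c] ≠ [] := by simp
  rw [fnA]
  simp only [dif_neg hne, List.getLast_concat, List.dropLast_concat]
  unfold incChar
  split_ifs <;> rfl

theorem fnA_eq_fnB (cs : List Char) : fnA cs = fnB cs := by
  induction cs using List.reverseRecOn with
  | nil => simp [fnA, fnB]
  | append_singleton head c ih =>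
      rw [fnA_snoc]
      by_cases hc : c = 'Z'
      · subst hc
        rw [if_pos rfl, ih, fnB_snoc_Z]
      · rw [if_neg hc, fnB_snoc_ne head c hc]

-- ===== VERDICT (by name: the statement is the Claim_ definition above) =====
theorem fn_next_string_spec : Claim_equal_fn_next_string := by
  intro doc s _
  unfold Spec_fn_next_string fn_next_string fn_next_string_alt
  rw [fnA_eq_fnB]
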